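-- pv_equiv track=rewrite | github.com/allianceauth/allianceauth | thirdparty/Mumble/authenticator.py | entity_decode
-- ===== SOURCE A (Python) =====
-- def entity_decode(string):
--     """
--     Python reverse implementation of php htmlspecialchars
--     """
--     htmlspecialchars = (('"', '&quot;'),
--                         ("'", '&#039;'),
--                         ('<', '&lt;'),
--                         ('>', '&gt'),
--                         ('&', '&amp;'))
--     ret = string
--     for (s, t) in htmlspecialchars:
--         ret = ret.replace(t, s)
--     return ret
-- ===== SOURCE B (Python) =====
-- def entity_decode(string):
--     """
--     Python reverse implementation of php htmlspecialchars
--     (single left-to-right scan with an entity table instead of five full-string replace passes)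
--     """
--     table = (('&quot;', '"'),
--              ('&#039;', "'"),
--              ('&lt;', '<'),
--              ('&gt', '>'),
--              ('&amp;', '&'))
--     out = []
--     i = 0
--     n = len(string)
--     while i < n:
--         c = string[i]
--         if c == '&':
--             for ent, ch in table:
--                 if string.startswith(ent, i):
--                     out.append(ch)
--                     i += len(ent)
--                     break
--             else:
--                 out.append(c)
--                 i += 1
--         else:
--             out.append(c)
--             i += 1
--     return ''.join(out)
-- ===== Notes on version B (the rewrite author's own statement) =====
-- stated objective: alternative
-- what changed: Replaces A's five sequential full-string str.replace passes with a single left-to-right scan that, at each ampersand tries the five entities from a table and emits the decoded character.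
import Mathlib
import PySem

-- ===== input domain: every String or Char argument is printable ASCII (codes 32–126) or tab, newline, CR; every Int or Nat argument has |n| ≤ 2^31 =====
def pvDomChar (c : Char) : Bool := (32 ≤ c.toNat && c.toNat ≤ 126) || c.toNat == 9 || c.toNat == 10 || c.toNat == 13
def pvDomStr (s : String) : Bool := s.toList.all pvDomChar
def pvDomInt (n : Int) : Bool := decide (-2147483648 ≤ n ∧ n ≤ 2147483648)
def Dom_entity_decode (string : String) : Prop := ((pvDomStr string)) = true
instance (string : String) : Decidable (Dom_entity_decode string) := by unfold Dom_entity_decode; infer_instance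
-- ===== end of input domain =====

-- B replaces A's five full-string replace passes by one left-to-right scan with an entity table (alternative single-pass algorithm; same result).

-- ===== PORT A =====
-- A: ret = string; for (s, t) in htmlspecialchars: ret = ret.replace(t, s); return ret
def entity_decode (string : String) : String :=
  let htmlspecialchars : List (String × String) :=
    [("\"", "&quot;"), ("'", "&#039;"), ("<", "&lt;"), (">", "&gt"), ("&", "&amp;")]
  let ret := htmlspecialchars.foldl (fun ret st => PySem.Str.replace ret st.2 st.1) string
  ret

-- ===== PORT B =====
-- B: single scan; at each position, if the char is '&' try each table entity as a prefix
-- (in table order), emit its decoded char and skip past it, else emit the char.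
def bScan : List Char → List Char
  | [] => []
  | c :: t =>
    if c = '&' then
      if ['&','q','u','o','t',';'].isPrefixOf (c :: t) then '"' :: bScan (t.drop 5)
      else if ['&','#','0','3','9',';'].isPrefixOf (c :: t) then '\'' :: bScan (t.drop 5)
      else if ['&','l','t',';'].isPrefixOf (c :: t) then '<' :: bScan (t.drop 3)
      else if ['&','g','t'].isPrefixOf (c :: t) then '>' :: bScan (t.drop 2)
      else if ['&','a','m','p',';'].isPrefixOf (c :: t) then '&' :: bScan (t.drop 4)
      else c :: bScan t
    else c :: bScan t
termination_by l => l.length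
decreasing_by all_goals simp [List.length_drop]; try omega

def entity_decode_alt (string : String) : String := String.ofList (bScan string.toList)

-- ===== PRECONDITION & SPEC =====
def Spec_entity_decode (string : String) (out : String) : Prop := out = entity_decode_alt string
instance (string : String) (out : String) : Decidable (Spec_entity_decode string out) := by unfold Spec_entity_decode; infer_instance

-- ===== CLAIM (what is proved, stated in full; the proofs are below) =====
def Claim_equal_entity_decode : Prop := ∀ (string : String), Dom_entity_decode string → Spec_entity_decode string (entity_decode string)

-- ===== LEMMAS AND PROOFS =====

-- fuel-free reformulation of PySem.Chars.replace (for nonempty `old`)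
def rep (old new : List Char) : List Char → List Char
  | [] => []
  | c :: t =>
    if old.isPrefixOf (c :: t) then new ++ rep old new (t.drop (old.length - 1))
    else c :: rep old new t
termination_by l => l.length
decreasing_by all_goals simp [List.length_drop]; try omega

theorem rep_cons (old new : List Char) (c : Char) (t : List Char) :
    rep old new (c :: t) =
      if old.isPrefixOf (c :: t) then new ++ rep old new (t.drop (old.length - 1))
      else c :: rep old new t := by
  rw [rep]

theorem go_eq_rep (old new : List Char) (hold : old ≠ []) :
    ∀ (fuel : Nat) (l acc : List Char), l.length ≤ fuel →
      PySem.Chars.replace.go old new fuel l acc = acc.reverse ++ rep old new l := by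
  intro fuel
  induction fuel with
  | zero =>
    intro l acc hl
    have : l = [] := by cases l <;> simp_all
    subst this
    rw [PySem.Chars.replace.go]
    simp [rep]
  | succ n ih =>
    intro l acc hl
    cases l with
    | nil =>
      rw [PySem.Chars.replace.go]
      all_goals try simp [rep]
    | cons c t =>
      rw [PySem.Chars.replace.go]
      rw [rep_cons]
      by_cases hp : old.isPrefixOf (c :: t) = true
      · simp only [hp, if_true]
        obtain ⟨o, old', rfl⟩ : ∃ o old', old = o :: old' := by
          cases old with
          | nil => exact absurd rfl hold
          | cons o old' => exact ⟨o, old', rfl⟩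
        have hdrop : List.drop (o :: old').length (c :: t) = t.drop ((o :: old').length - 1) := by
          simp
        rw [hdrop, ih _ _ (by simp at hl ⊢; omega)]
        simp
      · simp only [hp, if_false, Bool.false_eq_true]
        rw [ih _ _ (by simp at hl; omega)]
        simp

theorem replace_eq_rep (s old new : List Char) (hold : old ≠ []) :
    PySem.Chars.replace s old new = rep old new s := by
  rw [PySem.Chars.replace]
  have : old.isEmpty = false := by cases old <;> simp_all
  rw [this]
  simp only [Bool.false_eq_true, if_false]
  rw [go_eq_rep old new hold s.length s [] (le_refl _)]
  simp

-- stepping over a char that cannot start a match (entity heads are all '&')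
theorem rep_step_ne (o : Char) (p new : List Char) (c : Char) (t : List Char) (h : c ≠ o) :
    rep (o :: p) new (c :: t) = c :: rep (o :: p) new t := by
  rw [rep_cons]
  simp [List.isPrefixOf, Ne.symm h]

-- stepping over '&' when the rest of the entity does not follow
theorem rep_amp_no (p new : List Char) (t : List Char) (h : ¬ p <+: t) :
    rep ('&' :: p) new ('&' :: t) = '&' :: rep ('&' :: p) new t := by
  have hb : p.isPrefixOf t = false := by
    rw [Bool.eq_false_iff]
    intro hx
    exact h (List.isPrefixOf_iff_prefix.mp hx)
  rw [rep_cons]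
  simp [List.isPrefixOf, hb]

-- a prefix made of chars different from the single replacement char survives `rep` backwards
theorem prefix_rep (old : List Char) (ch : Char) :
    ∀ (x pat : List Char), ch ∉ pat → pat <+: rep old [ch] x → pat <+: x := by
  intro x
  induction x with
  | nil =>
    intro pat _ hpre
    rw [rep] at hpre
    simpa using hpre
  | cons c t ih =>
    intro pat hch hpre
    rw [rep_cons] at hpre
    by_cases hp : old.isPrefixOf (c :: t) = true
    · rw [if_pos hp] at hpre
      cases pat with
      | nil => exact List.nil_prefix
      | cons q qs =>
        exfalso
        obtain ⟨u, hu⟩ := hpre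
        have hq : q = ch := by
          have := congrArg List.head? hu
          simpa using this
        exact hch (hq ▸ List.mem_cons_self)
    · rw [if_neg hp] at hpre
      cases pat with
      | nil => exact List.nil_prefix
      | cons q qs =>
        obtain ⟨rfl, hqs⟩ := (List.cons_prefix_cons).mp hpre
        exact (List.cons_prefix_cons).mpr
          ⟨rfl, ih qs (fun hc => hch (List.mem_cons_of_mem _ hc)) hqs⟩

-- the five replace passes of A, as a composition
def compA (l : List Char) : List Char :=
  rep ['&','a','m','p',';'] ['&']
    (rep ['&','g','t'] ['>']
      (rep ['&','l','t',';'] ['<']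
        (rep ['&','#','0','3','9',';'] ['\'']
          (rep ['&','q','u','o','t',';'] ['"'] l))))

theorem compA_eq_bScan : ∀ (n : Nat) (l : List Char), l.length ≤ n → compA l = bScan l := by
  intro n
  induction n with
  | zero =>
    intro l hl
    have : l = [] := by cases l <;> simp_all
    subst this
    simp [compA, rep, bScan]
  | succ n ih =>
    intro l hl
    cases l with
    | nil => simp [compA, rep, bScan]
    | cons c t =>
      rw [bScan]
      by_cases hc : c = '&'
      case neg =>
        rw [if_neg hc, compA]
        rw [rep_step_ne _ _ _ _ _ hc, rep_step_ne _ _ _ _ _ hc, rep_step_ne _ _ _ _ _ hc,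
            rep_step_ne _ _ _ _ _ hc, rep_step_ne _ _ _ _ _ hc]
        exact congrArg _ (ih t (by simp at hl; omega))
      case pos =>
      subst hc
      rw [if_pos rfl]
      by_cases h1 : ['&','q','u','o','t',';'].isPrefixOf ('&' :: t) = true
      · rw [if_pos h1]
        obtain ⟨r, rfl⟩ : ∃ r, t = 'q'::'u'::'o'::'t'::';'::r := by
          obtain ⟨r, hr⟩ := List.isPrefixOf_iff_prefix.mp h1
          exact ⟨r, by simpa using hr.symm⟩
        have h := ih r (by simp at hl; omega)
        rw [compA] at h ⊢
        simp only [List.drop_succ_cons, List.drop_zero]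
        simp [rep_cons, List.isPrefixOf, h]
      rw [if_neg h1]
      by_cases h2 : ['&','#','0','3','9',';'].isPrefixOf ('&' :: t) = true
      · rw [if_pos h2]
        obtain ⟨r, rfl⟩ : ∃ r, t = '#'::'0'::'3'::'9'::';'::r := by
          obtain ⟨r, hr⟩ := List.isPrefixOf_iff_prefix.mp h2
          exact ⟨r, by simpa using hr.symm⟩
        have h := ih r (by simp at hl; omega)
        rw [compA] at h ⊢
        simp only [List.drop_succ_cons, List.drop_zero]
        simp [rep_cons, List.isPrefixOf, h]
      rw [if_neg h2]
      by_cases h3 : ['&','l','t',';'].isPrefixOf ('&' :: t) = true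
      · rw [if_pos h3]
        obtain ⟨r, rfl⟩ : ∃ r, t = 'l'::'t'::';'::r := by
          obtain ⟨r, hr⟩ := List.isPrefixOf_iff_prefix.mp h3
          exact ⟨r, by simpa using hr.symm⟩
        have h := ih r (by simp at hl; omega)
        rw [compA] at h ⊢
        simp only [List.drop_succ_cons, List.drop_zero]
        simp [rep_cons, List.isPrefixOf, h]
      rw [if_neg h3]
      by_cases h4 : ['&','g','t'].isPrefixOf ('&' :: t) = true
      · rw [if_pos h4]
        obtain ⟨r, rfl⟩ : ∃ r, t = 'g'::'t'::r := by
          obtain ⟨r, hr⟩ := List.isPrefixOf_iff_prefix.mp h4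
          exact ⟨r, by simpa using hr.symm⟩
        have h := ih r (by simp at hl; omega)
        rw [compA] at h ⊢
        simp only [List.drop_succ_cons, List.drop_zero]
        simp [rep_cons, List.isPrefixOf, h]
      rw [if_neg h4]
      by_cases h5 : ['&','a','m','p',';'].isPrefixOf ('&' :: t) = true
      · rw [if_pos h5]
        obtain ⟨r, rfl⟩ : ∃ r, t = 'a'::'m'::'p'::';'::r := by
          obtain ⟨r, hr⟩ := List.isPrefixOf_iff_prefix.mp h5
          exact ⟨r, by simpa using hr.symm⟩
        have h := ih r (by simp at hl; omega)
        rw [compA] at h ⊢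
        simp only [List.drop_succ_cons, List.drop_zero]
        simp [rep_cons, List.isPrefixOf, h]
      rw [if_neg h5]
      -- no entity starts here: every pass steps over the '&'
      have m1 : ¬ ['q','u','o','t',';'] <+: t :=
        fun hp => h1 (by simp [List.isPrefixOf_iff_prefix, hp])
      have m2 : ¬ ['#','0','3','9',';'] <+: t :=
        fun hp => h2 (by simp [List.isPrefixOf_iff_prefix, hp])
      have m3 : ¬ ['l','t',';'] <+: t :=
        fun hp => h3 (by simp [List.isPrefixOf_iff_prefix, hp])
      have m4 : ¬ ['g','t'] <+: t :=
        fun hp => h4 (by simp [List.isPrefixOf_iff_prefix, hp])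
      have m5 : ¬ ['a','m','p',';'] <+: t :=
        fun hp => h5 (by simp [List.isPrefixOf_iff_prefix, hp])
      have m2' : ¬ ['#','0','3','9',';'] <+: rep ['&','q','u','o','t',';'] ['"'] t :=
        fun hp => m2 (prefix_rep _ _ _ _ (by decide) hp)
      have m3' : ¬ ['l','t',';'] <+:
          rep ['&','#','0','3','9',';'] ['\''] (rep ['&','q','u','o','t',';'] ['"'] t) :=
        fun hp => m3 (prefix_rep _ _ _ _ (by decide) (prefix_rep _ _ _ _ (by decide) hp))
      have m4' : ¬ ['g','t'] <+:
          rep ['&','l','t',';'] ['<']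
            (rep ['&','#','0','3','9',';'] ['\''] (rep ['&','q','u','o','t',';'] ['"'] t)) :=
        fun hp => m4 (prefix_rep _ _ _ _ (by decide)
          (prefix_rep _ _ _ _ (by decide) (prefix_rep _ _ _ _ (by decide) hp)))
      have m5' : ¬ ['a','m','p',';'] <+:
          rep ['&','g','t'] ['>']
            (rep ['&','l','t',';'] ['<']
              (rep ['&','#','0','3','9',';'] ['\''] (rep ['&','q','u','o','t',';'] ['"'] t))) :=
        fun hp => m5 (prefix_rep _ _ _ _ (by decide) (prefix_rep _ _ _ _ (by decide)
          (prefix_rep _ _ _ _ (by decide) (prefix_rep _ _ _ _ (by decide) hp))))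
      rw [compA, rep_amp_no _ _ _ m1, rep_amp_no _ _ _ m2', rep_amp_no _ _ _ m3',
          rep_amp_no _ _ _ m4', rep_amp_no _ _ _ m5']
      exact congrArg _ (ih t (by simp at hl; omega))

theorem entity_decode_eq_compA (s : String) :
    entity_decode s = String.ofList (compA s.toList) := by
  have r1 : ∀ l : List Char, PySem.Chars.replace l ['&','q','u','o','t',';'] ['"']
      = rep ['&','q','u','o','t',';'] ['"'] l := fun l => replace_eq_rep l _ _ (by decide)
  have r2 : ∀ l : List Char, PySem.Chars.replace l ['&','#','0','3','9',';'] ['\'']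
      = rep ['&','#','0','3','9',';'] ['\''] l := fun l => replace_eq_rep l _ _ (by decide)
  have r3 : ∀ l : List Char, PySem.Chars.replace l ['&','l','t',';'] ['<']
      = rep ['&','l','t',';'] ['<'] l := fun l => replace_eq_rep l _ _ (by decide)
  have r4 : ∀ l : List Char, PySem.Chars.replace l ['&','g','t'] ['>']
      = rep ['&','g','t'] ['>'] l := fun l => replace_eq_rep l _ _ (by decide)
  have r5 : ∀ l : List Char, PySem.Chars.replace l ['&','a','m','p',';'] ['&']
      = rep ['&','a','m','p',';'] ['&'] l := fun l => replace_eq_rep l _ _ (by decide)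
  have e1 : ("&quot;" : String).toList = ['&','q','u','o','t',';'] := rfl
  have e2 : ("&#039;" : String).toList = ['&','#','0','3','9',';'] := rfl
  have e3 : ("&lt;" : String).toList = ['&','l','t',';'] := rfl
  have e4 : ("&gt" : String).toList = ['&','g','t'] := rfl
  have e5 : ("&amp;" : String).toList = ['&','a','m','p',';'] := rfl
  have f1 : ("\"" : String).toList = ['"'] := rfl
  have f2 : ("'" : String).toList = ['\''] := rfl
  have f3 : ("<" : String).toList = ['<'] := rfl
  have f4 : (">" : String).toList = ['>'] := rfl
  have f5 : ("&" : String).toList = ['&'] := rfl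
  simp only [entity_decode, List.foldl, PySem.Str.replace, String.toList_ofList,
    e1, e2, e3, e4, e5, f1, f2, f3, f4, f5, r1, r2, r3, r4, r5, compA]

-- ===== VERDICT (by name: the statement is the Claim_ definition above) =====
theorem entity_decode_spec : Claim_equal_entity_decode := by
  intro s _
  unfold Spec_entity_decode entity_decode_alt
  rw [entity_decode_eq_compA, compA_eq_bScan s.toList.length s.toList (le_refl _)]
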